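-- pv_equiv track=rewrite | github.com/quantifying-chaos/logistic_bifurcation | src/delta_hat_logistic_bifurcation.py | box_distri_count
-- ===== SOURCE A (Python) =====
-- def box_distri_count(vec):
--     """
--     Input a vector v = [0,0,0,1,1,4,0,0,0,2,0]
--     out put how many continuous, non-zero region there is.
--     eg, v has 2 continuous, non-zero region
--     [1,0,1,0,1] has three
--     """
--     res = 0
--     prev_is_zero = 1
--     for i in vec:
--         if i == 0:
--             prev_is_zero = 1
--             continue
--         # i != 0
--         if prev_is_zero:
--             res += 1
--         prev_is_zero = 0
--
--     return res
-- ===== SOURCE B (Python) =====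
-- def box_distri_count(vec):
--     # #(maximal non-zero runs) = #(non-zero elements) - #(adjacent pairs that are both non-zero):
--     # each run of length k contributes k elements and k-1 adjacent pairs, so k-(k-1)=1 per run.
--     nonzero = sum(1 for x in vec if x != 0)
--     adjacent = sum(1 for a, b in zip(vec, vec[1:]) if a != 0 and b != 0)
--     return nonzero - adjacent
-- ===== Notes on version B (the rewrite author's own statement) =====
-- stated objective: alternative
-- what changed: Replaced A's stateful prev_is_zero flag loop by the arithmetic identity runs = (#nonzero elements) - (#adjacent both-nonzero pairs), computed in two stateless counting passes over vec and zip(vec, vec[1:]).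
import Mathlib
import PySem

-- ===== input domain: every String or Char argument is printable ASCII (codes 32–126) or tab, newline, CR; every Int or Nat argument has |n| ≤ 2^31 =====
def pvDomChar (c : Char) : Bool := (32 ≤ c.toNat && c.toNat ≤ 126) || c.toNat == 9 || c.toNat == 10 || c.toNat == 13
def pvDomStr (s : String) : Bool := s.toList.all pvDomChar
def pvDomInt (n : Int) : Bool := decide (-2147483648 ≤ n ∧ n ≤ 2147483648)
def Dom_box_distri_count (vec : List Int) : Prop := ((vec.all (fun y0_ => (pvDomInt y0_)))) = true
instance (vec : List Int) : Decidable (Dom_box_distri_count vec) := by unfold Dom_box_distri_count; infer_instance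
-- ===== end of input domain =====

-- B replaces A's stateful prev_is_zero flag loop by the identity runs = #nonzero - #adjacent-both-nonzero pairs, two stateless counting passes (alternative decomposition; same O(n) cost).


-- ===== PORT A =====
-- Literal port of A: fold over vec with state (res, prev_is_zero), both Python ints.
def box_distri_count (vec : List Int) : Int :=
  (vec.foldl (fun (st : Int × Int) (i : Int) =>
      if i == 0 then (st.1, 1)
      else (if st.2 ≠ 0 then st.1 + 1 else st.1, 0)) (0, 1)).1

-- ===== PORT B =====
-- Port of B: count the non-zero elements, count the adjacent both-non-zero pairs
-- (zip(vec, vec[1:]) = vec.zip (vec.drop 1)), subtract.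
def box_distri_count_alt (vec : List Int) : Int :=
  (vec.countP (fun x => x != 0) : Int)
    - ((vec.zip (vec.drop 1)).countP (fun p => p.1 != 0 && p.2 != 0) : Int)

-- ===== PRECONDITION & SPEC =====
def Spec_box_distri_count (vec : List Int) (out : Int) : Prop := out = box_distri_count_alt vec
instance (vec : List Int) (out : Int) : Decidable (Spec_box_distri_count vec out) := by unfold Spec_box_distri_count; infer_instance

-- ===== CLAIM (what is proved, stated in full; the proofs are below) =====
def Claim_equal_box_distri_count : Prop := ∀ (vec : List Int), Dom_box_distri_count vec → Spec_box_distri_count vec (box_distri_count vec)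

-- ===== LEMMAS AND PROOFS =====
-- A's loop, element-wise, with the flag as a Bool (b = "previous element was zero").
def pvF (b : Bool) : List Int → Int
  | [] => 0
  | x :: xs => if x == 0 then pvF true xs else (if b then 1 else 0) + pvF false xs

-- The fold of A equals res + pvF on the remaining list (flag 1 ↔ true, 0 ↔ false).
theorem pvFoldA (vec : List Int) (res : Int) (p : Bool) :
    (vec.foldl (fun (st : Int × Int) (i : Int) =>
      if i == 0 then (st.1, 1)
      else (if st.2 ≠ 0 then st.1 + 1 else st.1, 0)) (res, if p then 1 else 0)).1
      = res + pvF p vec := by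
  induction vec generalizing res p with
  | nil => simp [pvF]
  | cons x xs ih =>
    rw [List.foldl_cons]
    by_cases hx : x = 0
    · have hstep : (if (x == 0) = true then ((res, if p = true then (1:Int) else 0).1, (1:Int))
          else (if (res, if p = true then (1:Int) else 0).2 ≠ 0
                  then (res, if p = true then (1:Int) else 0).1 + 1
                  else (res, if p = true then (1:Int) else 0).1, 0))
          = (res, if true = true then (1:Int) else 0) := by simp [hx]
      rw [hstep, ih, show pvF p (x :: xs) = pvF true xs by simp [pvF, hx]]
    · cases p with
      | true =>
        have hstep : (if (x == 0) = true then ((res, if true = true then (1:Int) else 0).1, (1:Int))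
            else (if (res, if true = true then (1:Int) else 0).2 ≠ 0
                    then (res, if true = true then (1:Int) else 0).1 + 1
                    else (res, if true = true then (1:Int) else 0).1, 0))
            = (res + 1, if false = true then (1:Int) else 0) := by simp [hx]
        rw [hstep, ih, show pvF true (x :: xs) = 1 + pvF false xs by simp [pvF, hx]]
        ring
      | false =>
        have hstep : (if (x == 0) = true then ((res, if false = true then (1:Int) else 0).1, (1:Int))
            else (if (res, if false = true then (1:Int) else 0).2 ≠ 0
                    then (res, if false = true then (1:Int) else 0).1 + 1
                    else (res, if false = true then (1:Int) else 0).1, 0))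
            = (res, if false = true then (1:Int) else 0) := by simp [hx]
        rw [hstep, ih, show pvF false (x :: xs) = pvF false xs by simp [pvF, hx]]

-- "head is non-zero" as an Int indicator.
def pvHdNZ : List Int → Int
  | [] => 0
  | y :: _ => if y = 0 then 0 else 1

-- Joint characterisation: pvF true xs = B's count; pvF false xs = B's count minus
-- the head-nonzero indicator (the run the pending flag would not re-open).
theorem pvF_eq_alt_aux (xs : List Int) :
    pvF true xs = box_distri_count_alt xs ∧
    pvF false xs = box_distri_count_alt xs - pvHdNZ xs := by
  induction xs with
  | nil => simp [pvF, box_distri_count_alt, pvHdNZ]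
  | cons x xs ih =>
    obtain ⟨iht, ihf⟩ := ih
    have hcount : box_distri_count_alt (x :: xs)
        = box_distri_count_alt xs + (if x = 0 then 0 else 1)
            - (if x = 0 then 0 else pvHdNZ xs) := by
      cases xs with
      | nil =>
        by_cases hx : x = 0 <;>
          simp [box_distri_count_alt, pvHdNZ, hx]
      | cons y t =>
        by_cases hx : x = 0 <;> by_cases hy : y = 0 <;>
          simp [box_distri_count_alt, pvHdNZ, hx, hy, List.countP_cons] <;> ring
    by_cases hx : x = 0
    · constructor
      · rw [show pvF true (x :: xs) = pvF true xs by simp [pvF, hx], iht, hcount]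
        simp [hx]
      · rw [show pvF false (x :: xs) = pvF true xs by simp [pvF, hx], iht, hcount]
        simp [pvHdNZ, hx]
    · constructor
      · rw [show pvF true (x :: xs) = 1 + pvF false xs by simp [pvF, hx], ihf, hcount]
        simp [hx]; ring
      · rw [show pvF false (x :: xs) = pvF false xs by simp [pvF, hx], ihf, hcount]
        simp [pvHdNZ, hx]
        ring

-- ===== VERDICT (by name: the statement is the Claim_ definition above) =====
theorem box_distri_count_spec : Claim_equal_box_distri_count := by
  intro vec _
  unfold Spec_box_distri_count box_distri_count
  rw [show ((0:Int), (1:Int)) = ((0:Int), if true then (1:Int) else 0) from rfl, pvFoldA,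
    (pvF_eq_alt_aux vec).1]
  ring
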